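-- pv_equiv track=rewrite | github.com/ongyiumark/analyzing-short-swaps | supervised-learning/verifier.py | check_reversal
-- ===== SOURCE A (Python) =====
-- def check_reversal(arr_before, arr_after, max_diff):
--         # Find the first two different elements from both ends of the after array, then reverse
--         first_diff_idx = None
--         last_diff_idx = None
--         for i in range(len(arr_before)):
--             if arr_before[i] != arr_after[i]:
--                 if first_diff_idx is None:
--                     first_diff_idx = i
--                 last_diff_idx = i
--         if first_diff_idx is None or first_diff_idx == last_diff_idx or last_diff_idx - first_diff_idx >= max_diff:
--             return False
--         arr_after_copy = arr_after[:]
--         arr_after_copy[first_diff_idx:last_diff_idx + 1] = arr_after[first_diff_idx:last_diff_idx + 1][::-1]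
--
--         return arr_after_copy == arr_before
-- ===== SOURCE B (Python) =====
-- def check_reversal(arr_before, arr_after, max_diff):
--     # Destructive end-stripping: pop equal elements off the tails, reverse both
--     # lists, pop again; the one-segment reversal exists iff the remaining cores
--     # have length >= 2, span < max_diff + 1, and are exact reverses of each other.
--     if len(arr_after) != len(arr_before):
--         return False
--     a = list(arr_before)
--     b = list(arr_after)
--     while a and a[-1] == b[-1]:
--         a.pop()
--         b.pop()
--     a.reverse()
--     b.reverse()
--     while a and a[-1] == b[-1]:
--         a.pop()
--         b.pop()
--     if len(a) < 2 or len(a) - 1 >= max_diff: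
--         return False
--     return a == b[::-1]
-- ===== Notes on version B (the rewrite author's own statement) =====
-- stated objective: alternative
-- what changed: Replaces the index scan recording first/last mismatch positions plus reversed-slice copy and whole-list comparison by index-free destructive end-stripping: pop equal elements off both tails, reverse both lists, pop again, then answer True iff the remaining cores have length >= 2, span < max_diff + 1, and are exact reverses of each other; Pre_ excludes shorter arr_after, on which A raises IndexError while B returns False.
import Mathlib
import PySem

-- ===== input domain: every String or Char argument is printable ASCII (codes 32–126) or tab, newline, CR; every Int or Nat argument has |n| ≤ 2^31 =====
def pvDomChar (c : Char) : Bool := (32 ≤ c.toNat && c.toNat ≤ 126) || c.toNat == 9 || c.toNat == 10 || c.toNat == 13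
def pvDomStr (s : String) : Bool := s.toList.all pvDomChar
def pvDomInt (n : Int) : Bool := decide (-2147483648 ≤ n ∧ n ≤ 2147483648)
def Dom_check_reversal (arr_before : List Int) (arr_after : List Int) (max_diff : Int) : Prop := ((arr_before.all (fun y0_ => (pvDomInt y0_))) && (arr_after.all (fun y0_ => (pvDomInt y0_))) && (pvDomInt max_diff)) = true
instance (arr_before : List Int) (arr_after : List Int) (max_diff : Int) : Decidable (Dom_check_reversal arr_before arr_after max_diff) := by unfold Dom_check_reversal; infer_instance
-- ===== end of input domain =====

-- B replaces A's index scan + reversed-slice copy + whole-list comparison by index-free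
-- destructive end-stripping (pop equal tails, reverse, pop again) and a wholesale
-- reverse-equality check of the cores (alternative decomposition, same cost).


-- ===== PORT A =====
-- state = (first_diff_idx, last_diff_idx); both are None exactly together, so one Option pair
def stepA (a b : List Int) (st : Option (Nat × Nat)) (i : Nat) : Option (Nat × Nat) :=
  if a.getD i 0 ≠ b.getD i 0 then
    match st with
    | none => some (i, i)
    | some (f, _) => some (f, i)
  else st

def check_reversal (arr_before : List Int) (arr_after : List Int) (max_diff : Int) : Bool :=
  let st := (List.range arr_before.length).foldl (stepA arr_before arr_after) none
  match st with
  | none => false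
  | some (f, l) =>
    if f = l ∨ (l : Int) - (f : Int) ≥ max_diff then false
    else
      -- arr_after[:] with arr_after[f:l+1] replaced by its reverse (replacement has equal length)
      let copy := arr_after.take f ++
        (PySem.List.slice arr_after (some (f : Int)) (some ((l : Int) + 1))).reverse ++
        arr_after.drop (l + 1)
      copy == arr_before

-- ===== PORT B =====
-- while a and a[-1] == b[-1]: a.pop(); b.pop()
-- (b[-1] is read only when a ≠ []; after B's length guard the lists always have equal
--  length here, so the getD default is never observed)
def stripTail (a b : List Int) : List Int × List Int :=
  if _h : a ≠ [] ∧ a.getLast?.getD 0 = b.getLast?.getD 0 then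
    stripTail a.dropLast b.dropLast
  else (a, b)
termination_by a.length
decreasing_by
  rcases a with _ | ⟨x, xs⟩
  · exact absurd rfl _h.1
  · simp [List.length_dropLast]

def check_reversal_alt (arr_before : List Int) (arr_after : List Int) (max_diff : Int) : Bool :=
  if arr_after.length ≠ arr_before.length then false
  else
    let p1 := stripTail arr_before arr_after
    let p2 := stripTail p1.1.reverse p1.2.reverse
    if p2.1.length < 2 ∨ (p2.1.length : Int) - 1 ≥ max_diff then false
    else p2.1 == p2.2.reverse

-- ===== PRECONDITION & SPEC =====
-- A raises IndexError exactly when arr_after is shorter than arr_before (its scan runs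
-- over all indices of arr_before); Pre_ excludes exactly those inputs.
def Pre_check_reversal (arr_before : List Int) (arr_after : List Int) (max_diff : Int) : Prop :=
  arr_before.length ≤ arr_after.length
instance (arr_before : List Int) (arr_after : List Int) (max_diff : Int) : Decidable (Pre_check_reversal arr_before arr_after max_diff) := by unfold Pre_check_reversal; infer_instance
def pvWitness_check_reversal : List Int × List Int × Int := ([1, 2, 3], [1, 3, 2], 5)

def Spec_check_reversal (arr_before : List Int) (arr_after : List Int) (max_diff : Int) (out : Bool) : Prop := out = check_reversal_alt arr_before arr_after max_diff
instance (arr_before : List Int) (arr_after : List Int) (max_diff : Int) (out : Bool) : Decidable (Spec_check_reversal arr_before arr_after max_diff out) := by unfold Spec_check_reversal; infer_instance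

-- ===== CLAIM (what is proved, stated in full; the proofs are below) =====
def Claim_equal_check_reversal : Prop := ∀ (arr_before : List Int) (arr_after : List Int) (max_diff : Int), Dom_check_reversal arr_before arr_after max_diff → Pre_check_reversal arr_before arr_after max_diff → Spec_check_reversal arr_before arr_after max_diff (check_reversal arr_before arr_after max_diff)

-- ===== LEMMAS AND PROOFS =====

-- invariant of A's fold: none ↔ no differing index < m; some (f, l) = first and last diff < m
def InvA (a b : List Int) (m : Nat) : Option (Nat × Nat) → Prop
  | none => ∀ i, i < m → a.getD i 0 = b.getD i 0
  | some (f, l) =>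
      a.getD f 0 ≠ b.getD f 0 ∧ a.getD l 0 ≠ b.getD l 0 ∧ f ≤ l ∧ l < m ∧
      (∀ i, i < f → a.getD i 0 = b.getD i 0) ∧
      (∀ i, l < i → i < m → a.getD i 0 = b.getD i 0)

theorem stepInvA (a b : List Int) (m : Nat) (st : Option (Nat × Nat)) (h : InvA a b m st) :
    InvA a b (m + 1) (stepA a b st m) := by
  unfold stepA
  by_cases hm : a.getD m 0 ≠ b.getD m 0
  · rw [if_pos hm]
    rcases st with _ | ⟨f, l⟩
    · exact ⟨hm, hm, le_refl _, by omega, fun i hi => h i (by omega), fun i h1 h2 => by omega⟩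
    · obtain ⟨h1, h2, h3, h4, h5, h6⟩ := h
      exact ⟨h1, hm, by omega, by omega, h5, fun i hi1 hi2 => by omega⟩
  · rw [if_neg hm]
    rcases st with _ | ⟨f, l⟩
    · intro i hi
      by_cases hilt : i < m
      · exact h i hilt
      · have : i = m := by omega
        subst this; exact not_not.mp hm
    · obtain ⟨h1, h2, h3, h4, h5, h6⟩ := h
      refine ⟨h1, h2, h3, by omega, h5, fun i hi1 hi2 => ?_⟩
      by_cases hilt : i < m
      · exact h6 i hi1 hilt
      · have : i = m := by omega
        subst this; exact not_not.mp hm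

theorem foldA_inv (a b : List Int) (m : Nat) :
    InvA a b m ((List.range m).foldl (stepA a b) none) := by
  induction m with
  | zero => intro i hi; omega
  | succ m ih =>
    rw [List.range_succ, List.foldl_append]
    simp only [List.foldl_cons, List.foldl_nil]
    exact stepInvA a b m _ ih

-- getLast?.getD 0 = getD (length - 1) 0 for nonempty lists
theorem getLast_getD (a : List Int) (ha : a ≠ []) :
    a.getLast?.getD 0 = a.getD (a.length - 1) 0 := by
  rw [List.getLast?_eq_getElem?, List.getD_eq_getElem?_getD]

-- characterisation of stripTail: if a and b (equal length) agree on all indices ≥ m and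
-- (m = 0 or they differ at m - 1), then stripTail keeps exactly the first m elements
theorem stripTail_eq (a b : List Int) (hlen : a.length = b.length) (m : Nat)
    (hm : m ≤ a.length)
    (hagree : ∀ i, m ≤ i → i < a.length → a.getD i 0 = b.getD i 0)
    (hstop : m = 0 ∨ a.getD (m - 1) 0 ≠ b.getD (m - 1) 0) :
    stripTail a b = (a.take m, b.take m) := by
  induction hd : a.length - m generalizing a b with
  | zero =>
    have hm' : m = a.length := by omega
    rw [stripTail]
    have hcond : ¬(a ≠ [] ∧ a.getLast?.getD 0 = b.getLast?.getD 0) := by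
      rintro ⟨hne, heq⟩
      have hpos : 0 < a.length := List.length_pos_of_ne_nil hne
      have hbne : b ≠ [] := by
        intro hb
        rw [hb, List.length_nil] at hlen
        omega
      rw [getLast_getD a hne, getLast_getD b hbne, ← hlen] at heq
      rcases hstop with h0 | hdiff
      · omega
      · rw [hm'] at hdiff
        exact hdiff heq
    rw [dif_neg hcond, Prod.mk.injEq]
    constructor
    · rw [hm', List.take_length]
    · rw [hm'.trans hlen, List.take_length]
  | succ k ih =>
    have hne : a ≠ [] := by
      intro h; rw [h] at hd; simp at hd
    have hbne : b ≠ [] := by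
      intro hb
      rw [hb, List.length_nil] at hlen
      omega
    rw [stripTail]
    have heq : a.getLast?.getD 0 = b.getLast?.getD 0 := by
      rw [getLast_getD a hne, getLast_getD b hbne, ← hlen]
      exact hagree (a.length - 1) (by omega) (by omega)
    rw [dif_pos ⟨hne, heq⟩]
    have hla : a.dropLast.length = a.length - 1 := List.length_dropLast
    have hlb : b.dropLast.length = b.length - 1 := List.length_dropLast
    have hgetD : ∀ (x : List Int) i, i < x.length - 1 → x.dropLast.getD i 0 = x.getD i 0 := by
      intro x i hi
      rw [List.getD_eq_getElem?_getD, List.getD_eq_getElem?_getD, List.dropLast_eq_take,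
        List.getElem?_take_of_lt (by omega)]
    have hrec := ih a.dropLast b.dropLast (by omega) (by omega)
      (by
        intro i hi1 hi2
        rw [hla] at hi2
        rw [hgetD a i (by omega), hgetD b i (by omega)]
        exact hagree i hi1 (by omega))
      (by
        rcases hstop with h0 | hdiff
        · exact Or.inl h0
        · rcases Nat.eq_zero_or_pos m with h0 | hpos
          · exact Or.inl h0
          · refine Or.inr ?_
            rw [hgetD a (m - 1) (by omega), hgetD b (m - 1) (by omega)]
            exact hdiff)
      (by omega)
    rw [hrec, List.dropLast_eq_take, List.take_take, List.dropLast_eq_take, List.take_take,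
      Nat.min_eq_left (by omega), Nat.min_eq_left (by omega)]

-- ===== VERDICT (by name: the statement is the Claim_ definition above) =====
-- elements of take / drop / reverse as getD (helpers for the main proof)
theorem getD_take (x : List Int) (n i : Nat) (hi : i < n) :
    (x.take n).getD i 0 = x.getD i 0 := by
  rw [List.getD_eq_getElem?_getD, List.getD_eq_getElem?_getD, List.getElem?_take_of_lt hi]

theorem getD_reverse (x : List Int) (i : Nat) (hi : i < x.length) :
    x.reverse.getD i 0 = x.getD (x.length - 1 - i) 0 := by
  rw [List.getD_eq_getElem?_getD, List.getD_eq_getElem?_getD, List.getElem?_reverse hi]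

-- the two lists agree (as getD) on a common range of indices ⇒ take/drop pieces are equal
theorem take_eq_of_agree (a b : List Int) (f : Nat) (hfa : f ≤ a.length) (hfb : f ≤ b.length)
    (h : ∀ i, i < f → a.getD i 0 = b.getD i 0) : a.take f = b.take f := by
  apply List.ext_getElem (by simp; omega)
  intro i h1 h2
  have h1' : i < f := by simp at h1; omega
  have := h i h1'
  rw [List.getD_eq_getElem?_getD, List.getD_eq_getElem?_getD,
    List.getElem?_eq_getElem (by omega : i < a.length),
    List.getElem?_eq_getElem (by omega : i < b.length)] at this
  simp only [Option.getD_some] at this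
  simp [List.getElem_take, this]

theorem drop_eq_of_agree (a b : List Int) (k : Nat) (hlen : a.length = b.length)
    (h : ∀ i, k ≤ i → i < a.length → a.getD i 0 = b.getD i 0) : a.drop k = b.drop k := by
  apply List.ext_getElem (by simp [hlen])
  intro i h1 h2
  simp only [List.length_drop] at h1
  have := h (k + i) (by omega) (by omega)
  rw [List.getD_eq_getElem?_getD, List.getD_eq_getElem?_getD,
    List.getElem?_eq_getElem (by omega : k + i < a.length),
    List.getElem?_eq_getElem (by omega : k + i < b.length)] at this
  simp only [Option.getD_some] at this
  simp [List.getElem_drop, this]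

-- ===== VERDICT (by name: the statement is the Claim_ definition above) =====
theorem check_reversal_spec : Claim_equal_check_reversal := by
  intro a b md _hdom hpre
  unfold Pre_check_reversal at hpre
  unfold Spec_check_reversal check_reversal check_reversal_alt
  have hinv := foldA_inv a b a.length
  rcases hFv : (List.range a.length).foldl (stepA a b) none with _ | ⟨f, l⟩ <;>
    rw [hFv] at hinv
  case none =>
    change false = _
    by_cases hlen : b.length = a.length
    · rw [if_neg (by omega : ¬ b.length ≠ a.length)]
      have h1 : stripTail a b = (a.take 0, b.take 0) :=
        stripTail_eq a b hlen.symm 0 (by omega) (fun i _ hi => hinv i hi) (Or.inl rfl)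
      simp only [h1, List.take_zero, List.reverse_nil]
      rw [show stripTail ([] : List Int) [] = ([], []) from by rw [stripTail]; simp]
      simp
    · rw [if_pos (by omega : b.length ≠ a.length)]
  case some =>
    obtain ⟨hPf, hPl, hfl, hln, hbelow, habove⟩ := hinv
    change (if f = l ∨ (l : Int) - (f : Int) ≥ md then false else _) = _
    by_cases hlen : b.length = a.length
    · rw [if_neg (by omega : ¬ b.length ≠ a.length)]
      -- first strip: keep indices < l + 1
      have h1 : stripTail a b = (a.take (l + 1), b.take (l + 1)) := by
        refine stripTail_eq a b hlen.symm (l + 1) (by omega)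
          (fun i hi1 hi2 => habove i (by omega) hi2) (Or.inr ?_)
        simpa using hPl
      set a1 := a.take (l + 1) with ha1
      set b1 := b.take (l + 1) with hb1
      have hla1 : a1.length = l + 1 := by simp [ha1]; omega
      have hlb1 : b1.length = l + 1 := by simp [hb1]; omega
      -- second strip on the reversed prefixes: keep indices < l + 1 - f
      have h2 : stripTail a1.reverse b1.reverse =
          (a1.reverse.take (l + 1 - f), b1.reverse.take (l + 1 - f)) := by
        refine stripTail_eq a1.reverse b1.reverse (by simp [hla1, hlb1]) (l + 1 - f)
          (by rw [List.length_reverse, hla1]; omega) (fun i hi1 hi2 => ?_) (Or.inr ?_)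
        · simp only [List.length_reverse, hla1] at hi2
          rw [getD_reverse a1 i (by omega), getD_reverse b1 i (by omega), hla1, hlb1,
            show l + 1 - 1 - i = l - i from by omega]
          rw [getD_take a (l + 1) (l - i) (by omega), getD_take b (l + 1) (l - i) (by omega)]
          exact hbelow (l - i) (by omega)
        · rw [getD_reverse a1 (l + 1 - f - 1) (by omega),
            getD_reverse b1 (l + 1 - f - 1) (by omega), hla1, hlb1,
            show l + 1 - 1 - (l + 1 - f - 1) = f from by omega,
            getD_take a (l + 1) f (by omega), getD_take b (l + 1) f (by omega)]
          exact hPf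
      simp only [h1, h2]
      have hlrev : (a1.reverse.take (l + 1 - f)).length = l + 1 - f := by
        simp [hla1]
      -- the segments of a and b between f and l
      set segA := (a.drop f).take (l + 1 - f) with hsegA
      set segB := (b.drop f).take (l + 1 - f) with hsegB
      have ha2 : a1.reverse.take (l + 1 - f) = segA.reverse := by
        rw [List.take_reverse, hla1, show l + 1 - (l + 1 - f) = f from by omega,
          ha1, List.drop_take, hsegA]
      have hb2 : b1.reverse.take (l + 1 - f) = segB.reverse := by
        rw [List.take_reverse, hlb1, show l + 1 - (l + 1 - f) = f from by omega,
          hb1, List.drop_take, hsegB]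
      by_cases hguard : f = l ∨ (l : Int) - (f : Int) ≥ md
      · rw [if_pos hguard, if_pos (by rw [hlrev]; push_cast; omega)]
      · rw [if_neg hguard, if_neg (by rw [hlrev]; push_cast; omega)]
        -- both sides reduce to: the f..l segments are reverses of each other
        rw [ha2, hb2, List.reverse_reverse]
        simp only [show ((l : Int) + 1) = (((l + 1 : Nat) : Int)) from by push_cast; ring,
          PySem.List.slice_natCast]
        rw [← hsegB]
        have hbtake : b.take f = a.take f :=
          take_eq_of_agree b a f (by omega) (by omega) (fun i hi => (hbelow i hi).symm)
        have hbdrop : b.drop (l + 1) = a.drop (l + 1) :=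
          drop_eq_of_agree b a (l + 1) (by omega)
            (fun i hi1 hi2 => (habove i (by omega) (by omega)).symm)
        have hadecomp : a = a.take f ++ segA ++ a.drop (l + 1) := by
          have hdd : (a.drop f).drop (l + 1 - f) = a.drop (l + 1) := by
            rw [List.drop_drop]
            congr 1
            omega
          rw [hsegA, List.append_assoc, ← hdd, List.take_append_drop, List.take_append_drop]
        rw [hbtake, hbdrop]
        have key : (a.take f ++ segB.reverse ++ a.drop (l + 1) = a) ↔ segA.reverse = segB := by
          constructor
          · intro h
            have h' := h.trans hadecomp
            rw [List.append_assoc, List.append_assoc, List.append_right_inj,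
              List.append_left_inj] at h'
            rw [← h', List.reverse_reverse]
          · intro h
            rw [← h, List.reverse_reverse]
            exact hadecomp.symm
        rw [Bool.eq_iff_iff]
        simp only [beq_iff_eq]
        exact key
    · rw [if_pos (by omega : b.length ≠ a.length)]
      by_cases hguard : f = l ∨ (l : Int) - (f : Int) ≥ md
      · rw [if_pos hguard]
      · rw [if_neg hguard]
        simp only [show ((l : Int) + 1) = (((l + 1 : Nat) : Int)) from by push_cast; ring,
          PySem.List.slice_natCast]
        have hne : ¬(b.take f ++ (((b.drop f).take (l + 1 - f)).reverse ++ b.drop (l + 1))) = a := by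
          intro h
          have := congrArg List.length h
          simp at this
          omega
        simp [hne]
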